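-- pv_equiv track=rewrite | github.com/misbamustaqim/MachineLearnig-Project | Age_By_Likes.py | Calculate_Majority_of_age
-- ===== SOURCE A (Python) =====
-- def Calculate_Majority_of_age(data_Age):
--     # Counting age ranges
--     age_grp_xx_24 = 0
--     age_grp_25_34 = 0
--     age_grp_35_49 = 0
--     age_grp_50_xx = 0
--
--     for age in data_Age['age']:
--         if (age >= 00 and age < 25):
--             age_grp_xx_24 = age_grp_xx_24 + 1
--         if (age >= 25 and age < 35):
--             age_grp_25_34 = age_grp_25_34 + 1
--         if (age >= 35 and age < 50):
--             age_grp_35_49 = age_grp_35_49 + 1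
--         if (age >= 50):
--             age_grp_50_xx = age_grp_50_xx + 1
--
--     max_age = max(age_grp_xx_24, age_grp_25_34, age_grp_35_49, age_grp_50_xx)
--     if (max_age == age_grp_xx_24):
--         age_grp = "xx_24"
--     elif (max_age == age_grp_25_34):
--         age_grp = "25_34"
--     elif (max_age == age_grp_35_49):
--         age_grp = "35_49"
--     elif (max_age == age_grp_50_xx):
--         age_grp = "50_xx"
--     return age_grp
-- ===== SOURCE B (Python) =====
-- def Calculate_Majority_of_age(data_Age):
--     ages = data_Age['age']
--     c0 = sum(1 for age in ages if 0 <= age < 25)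
--     c1 = sum(1 for age in ages if 25 <= age < 35)
--     c2 = sum(1 for age in ages if 35 <= age < 50)
--     c3 = sum(1 for age in ages if age >= 50)
--     max_age = max(c0, c1, c2, c3)
--     if max_age == c0:
--         return "xx_24"
--     elif max_age == c1:
--         return "25_34"
--     elif max_age == c2:
--         return "35_49"
--     else:
--         return "50_xx"
-- ===== Notes on version B (the rewrite author's own statement) =====
-- stated objective: idiomatic
-- what changed: replaces the single loop maintaining four mutable counters by four independent generator-sum counting passes over the list, keeping the identical max/elif selection and tie-break
import Mathlib
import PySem

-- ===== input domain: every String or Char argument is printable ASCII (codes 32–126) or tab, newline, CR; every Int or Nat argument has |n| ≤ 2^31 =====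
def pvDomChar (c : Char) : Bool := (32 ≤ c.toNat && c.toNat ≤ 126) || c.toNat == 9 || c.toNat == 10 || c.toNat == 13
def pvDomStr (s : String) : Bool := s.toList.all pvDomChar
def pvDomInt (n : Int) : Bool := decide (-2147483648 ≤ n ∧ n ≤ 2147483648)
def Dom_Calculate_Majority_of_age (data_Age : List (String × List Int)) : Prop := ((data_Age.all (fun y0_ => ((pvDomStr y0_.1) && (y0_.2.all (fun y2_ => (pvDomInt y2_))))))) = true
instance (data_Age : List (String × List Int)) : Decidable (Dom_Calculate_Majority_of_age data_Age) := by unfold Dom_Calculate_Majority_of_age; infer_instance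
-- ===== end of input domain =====

-- B replaces A's single loop over four mutable counters by four independent
-- counting passes (one per age bin) with the identical max/elif selection (idiomatic).


-- ===== PORT A =====
-- the four-counter loop body, one step per list element, four ifs in source order
def agStep (st : Int × Int × Int × Int) (age : Int) : Int × Int × Int × Int :=
  let st := if age ≥ 0 ∧ age < 25 then (st.1 + 1, st.2.1, st.2.2.1, st.2.2.2) else st
  let st := if age ≥ 25 ∧ age < 35 then (st.1, st.2.1 + 1, st.2.2.1, st.2.2.2) else st
  let st := if age ≥ 35 ∧ age < 50 then (st.1, st.2.1, st.2.2.1 + 1, st.2.2.2) else st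
  let st := if age ≥ 50 then (st.1, st.2.1, st.2.2.1, st.2.2.2 + 1) else st
  st

def Calculate_Majority_of_age (data_Age : List (String × List Int)) : String :=
  match PySem.Dict.get? (PySem.Dict.mk data_Age) "age" with
  | none => ""  -- Python raises KeyError here; excluded by Pre_
  | some ages =>
    let s := ages.foldl agStep (0, 0, 0, 0)
    let max_age := max (max (max s.1 s.2.1) s.2.2.1) s.2.2.2
    if max_age == s.1 then "xx_24"
    else if max_age == s.2.1 then "25_34"
    else if max_age == s.2.2.1 then "35_49"
    else if max_age == s.2.2.2 then "50_xx"
    else ""  -- unreachable (Python's age_grp would be unbound; the max always matches one counter)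

-- ===== PORT B =====
def Calculate_Majority_of_age_alt (data_Age : List (String × List Int)) : String :=
  match PySem.Dict.get? (PySem.Dict.mk data_Age) "age" with
  | none => ""  -- Python raises KeyError here; excluded by Pre_
  | some ages =>
    let c0 : Int := (ages.countP (fun a => decide (0 ≤ a ∧ a < 25)) : Nat)
    let c1 : Int := (ages.countP (fun a => decide (25 ≤ a ∧ a < 35)) : Nat)
    let c2 : Int := (ages.countP (fun a => decide (35 ≤ a ∧ a < 50)) : Nat)
    let c3 : Int := (ages.countP (fun a => decide (50 ≤ a)) : Nat)
    let max_age := max (max (max c0 c1) c2) c3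
    if max_age == c0 then "xx_24"
    else if max_age == c1 then "25_34"
    else if max_age == c2 then "35_49"
    else "50_xx"

-- ===== PRECONDITION & SPEC =====
-- Pre_ excludes only dicts without an 'age' key, on which A raises KeyError.
def Pre_Calculate_Majority_of_age (data_Age : List (String × List Int)) : Prop :=
  (PySem.Dict.get? (PySem.Dict.mk data_Age) "age").isSome = true
instance (data_Age : List (String × List Int)) : Decidable (Pre_Calculate_Majority_of_age data_Age) := by unfold Pre_Calculate_Majority_of_age; infer_instance
def pvWitness_Calculate_Majority_of_age : (List (String × List Int)) := [("age", [10, 30, 30])]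

def Spec_Calculate_Majority_of_age (data_Age : List (String × List Int)) (out : String) : Prop := out = Calculate_Majority_of_age_alt data_Age
instance (data_Age : List (String × List Int)) (out : String) : Decidable (Spec_Calculate_Majority_of_age data_Age out) := by unfold Spec_Calculate_Majority_of_age; infer_instance

-- ===== CLAIM (what is proved, stated in full; the proofs are below) =====
def Claim_equal_Calculate_Majority_of_age : Prop := ∀ (data_Age : List (String × List Int)), Dom_Calculate_Majority_of_age data_Age → Pre_Calculate_Majority_of_age data_Age → Spec_Calculate_Majority_of_age data_Age (Calculate_Majority_of_age data_Age)

-- ===== LEMMAS AND PROOFS =====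
-- the four-counter fold computes (init + the four bin counts)
theorem agFold_eq (l : List Int) (a b c d : Int) :
    l.foldl agStep (a, b, c, d) =
      (a + (l.countP (fun x => decide (0 ≤ x ∧ x < 25)) : Nat),
       b + (l.countP (fun x => decide (25 ≤ x ∧ x < 35)) : Nat),
       c + (l.countP (fun x => decide (35 ≤ x ∧ x < 50)) : Nat),
       d + (l.countP (fun x => decide (50 ≤ x)) : Nat)) := by
  induction l generalizing a b c d with
  | nil => simp
  | cons x xs ih =>
    simp only [List.foldl_cons, List.countP_cons, agStep, decide_eq_true_eq]
    split_ifs <;> rw [ih] <;> simp only [Prod.mk.injEq] <;> push_cast <;> omega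

-- ===== VERDICT (by name: the statement is the Claim_ definition above) =====
theorem Calculate_Majority_of_age_spec : Claim_equal_Calculate_Majority_of_age := by
  intro d _ hpre
  unfold Spec_Calculate_Majority_of_age Calculate_Majority_of_age Calculate_Majority_of_age_alt
  cases h : PySem.Dict.get? (PySem.Dict.mk d) "age" with
  | none => rfl
  | some ages =>
    simp only [agFold_eq ages 0 0 0 0, zero_add]
    set c0 : Int := ((ages.countP (fun x => decide (0 ≤ x ∧ x < 25)) : Nat) : Int) with hc0
    set c1 : Int := ((ages.countP (fun x => decide (25 ≤ x ∧ x < 35)) : Nat) : Int) with hc1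
    set c2 : Int := ((ages.countP (fun x => decide (35 ≤ x ∧ x < 50)) : Nat) : Int) with hc2
    set c3 : Int := ((ages.countP (fun x => decide (50 ≤ x)) : Nat) : Int) with hc3
    simp only [beq_iff_eq]
    split_ifs with h1 h2 h3 h4 <;> try rfl
    · -- A's unreachable else: max equals none of the four, contradiction
      exact absurd (by omega : max (max (max c0 c1) c2) c3 = c3) h4
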